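-- pv_equiv track=rewrite | github.com/frankRenlf/python_practice | clrs/leetcode/T2460.py | applyOperations2
-- ===== SOURCE A (Python) =====
-- from typing import List
--
-- def applyOperations2(nums: List[int]) -> List[int]:
--     n = len(nums)
--     j = 0
--     for i in range(n):
--         if i + 1 < n and nums[i] == nums[i + 1]:
--             nums[i] *= 2
--             nums[i + 1] = 0
--         if nums[i] > 0:
--             nums[i], nums[j] = nums[j], nums[i]
--             j += 1
--     return nums
-- ===== SOURCE B (Python) =====
-- from typing import List
--
-- def applyOperations2(nums: List[int]) -> List[int]:
--     # Pass 1: double each element that equals its successor (zeroing the successor),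
--     # carried along as the previous value instead of index lookahead.
--     doubled = []
--     prev = None
--     for x in nums:
--         if prev is None:
--             prev = x
--         elif prev == x:
--             doubled.append(prev * 2)
--             prev = 0
--         else:
--             doubled.append(prev)
--             prev = x
--     if prev is not None:
--         doubled.append(prev)
--     # Pass 2: standard swap partition moving the positive values to the front.
--     j = 0
--     for i in range(len(doubled)):
--         if doubled[i] > 0:
--             doubled[i], doubled[j] = doubled[j], doubled[i]
--             j += 1
--     nums[:] = doubled
--     return nums
-- ===== Notes on version B (the rewrite author's own statement) =====
-- stated objective: alternative
-- what changed: Splits A's fused single loop into two independent passes: the doubling is restructured around a carried previous value over the list's values (no index lookahead into a mutating array), and the compaction becomes a separate standard swap-partition pass; the result is written back with nums[:]=.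
import Mathlib
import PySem

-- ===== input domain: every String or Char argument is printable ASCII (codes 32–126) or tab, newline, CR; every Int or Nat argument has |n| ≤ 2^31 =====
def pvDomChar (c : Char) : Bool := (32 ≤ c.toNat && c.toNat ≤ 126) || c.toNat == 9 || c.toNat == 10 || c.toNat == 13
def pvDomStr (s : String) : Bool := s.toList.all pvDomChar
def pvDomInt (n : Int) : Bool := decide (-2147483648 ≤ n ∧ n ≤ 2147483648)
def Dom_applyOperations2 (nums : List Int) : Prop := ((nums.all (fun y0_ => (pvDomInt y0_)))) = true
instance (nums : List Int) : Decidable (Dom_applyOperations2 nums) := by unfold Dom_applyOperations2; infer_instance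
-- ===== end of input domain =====

-- B splits A's fused loop into two independent passes: a carry-based doubling pass over
-- the values (no index lookahead), then the standard swap partition; equal return value,
-- and both mutate the argument list in place to that same value.


-- ===== PORT A =====
-- one iteration of A's loop body (indices i over range n, state = (array, j))
def stepA (n : Nat) (st : List Int × Nat) (i : Nat) : List Int × Nat :=
  let a := st.1
  let j := st.2
  let a := if i + 1 < n ∧ a.getD i 0 = a.getD (i + 1) 0
           then (a.set i (a.getD i 0 * 2)).set (i + 1) 0 else a
  if a.getD i 0 > 0 then ((a.set i (a.getD j 0)).set j (a.getD i 0), j + 1)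
  else (a, j)

def applyOperations2 (nums : List Int) : List Int :=
  let n := nums.length
  ((List.range n).foldl (stepA n) (nums, 0)).1

-- ===== PORT B =====
-- pass 1 step: carry-based doubling (state = (doubled, carry); carry none = Python's prev is None)
def stepD (st : List Int × Option Int) (x : Int) : List Int × Option Int :=
  match st.2 with
  | none => (st.1, some x)
  | some c => if c = x then (st.1 ++ [c * 2], some 0) else (st.1 ++ [c], some x)

-- pass 2 step: swap partition (state = (array, j))
def stepB (st : List Int × Nat) (i : Nat) : List Int × Nat :=
  if st.1.getD i 0 > 0 then ((st.1.set i (st.1.getD st.2 0)).set st.2 (st.1.getD i 0), st.2 + 1)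
  else st

def applyOperations2_alt (nums : List Int) : List Int :=
  let st := nums.foldl stepD ([], none)
  let doubled := match st.2 with | none => st.1 | some c => st.1 ++ [c]
  ((List.range doubled.length).foldl stepB (doubled, 0)).1

-- ===== PRECONDITION & SPEC =====
def Spec_applyOperations2 (nums : List Int) (out : List Int) : Prop := out = applyOperations2_alt nums
instance (nums : List Int) (out : List Int) : Decidable (Spec_applyOperations2 nums out) := by unfold Spec_applyOperations2; infer_instance

-- ===== CLAIM (what is proved, stated in full; the proofs are below) =====
def Claim_equal_applyOperations2 : Prop := ∀ (nums : List Int), Dom_applyOperations2 nums → Spec_applyOperations2 nums (applyOperations2 nums)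

-- ===== LEMMAS AND PROOFS =====

-- reference doubling pass (structural recursion)
def dbl : List Int → List Int
  | [] => []
  | [x] => [x]
  | x :: y :: t => if x = y then x * 2 :: dbl (0 :: t) else x :: dbl (y :: t)
termination_by l => l.length

-- reference compaction pass on a plain queue
def stepQ (st : List Int × List Int) (x : Int) : List Int × List Int :=
  if x > 0 then (st.1 ++ [x], match st.2 with | [] => [] | b :: t => t ++ [b])
  else (st.1, st.2 ++ [x])

theorem getD_len (L l2 : List Int) : (L ++ l2).getD L.length 0 = l2.getD 0 0 := by
  simp [List.getD, List.getElem?_append_right]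

theorem set_len (L l2 : List Int) (v : Int) : (L ++ l2).set L.length v = L ++ l2.set 0 v := by
  simp

theorem finD_foldl : ∀ (l acc : List Int) (c : Int),
    (match (l.foldl stepD (acc, some c)).2 with
     | none => (l.foldl stepD (acc, some c)).1
     | some d => (l.foldl stepD (acc, some c)).1 ++ [d]) = acc ++ dbl (c :: l) := by
  intro l
  induction l with
  | nil => intro acc c; simp [dbl]
  | cons x t ih =>
    intro acc c
    by_cases hc : c = x
    · simp only [List.foldl_cons, stepD, if_pos hc, ih, dbl, List.append_assoc,
        List.singleton_append]
    · simp only [List.foldl_cons, stepD, ih, dbl, List.append_assoc,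
        List.singleton_append, if_neg hc]

-- the swap half of A's loop body sends (pos, buf, z) to stepQ's next state
theorem stepA_swap (pos buf rest' : List Int) (z : Int) :
    (if (pos ++ buf ++ z :: rest').getD ((pos ++ buf).length) 0 > 0 then
       (((pos ++ buf ++ z :: rest').set ((pos ++ buf).length)
           ((pos ++ buf ++ z :: rest').getD pos.length 0)).set pos.length
           ((pos ++ buf ++ z :: rest').getD ((pos ++ buf).length) 0), pos.length + 1)
     else (pos ++ buf ++ z :: rest', pos.length))
    = ((stepQ (pos, buf) z).1 ++ (stepQ (pos, buf) z).2 ++ rest', (stepQ (pos, buf) z).1.length) := by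
  have hz : (pos ++ buf ++ z :: rest').getD ((pos ++ buf).length) 0 = z := by
    rw [getD_len]; rfl
  by_cases hp : z > 0
  · rw [if_pos (by rw [hz]; exact hp)]
    cases buf with
    | nil =>
      simp only [List.append_nil] at hz ⊢
      rw [hz, set_len, set_len]
      simp [stepQ, if_pos hp]
    | cons b bt =>
      have hj : (pos ++ (b :: bt) ++ z :: rest').getD pos.length 0 = b := by
        rw [List.append_assoc, getD_len]; rfl
      rw [hz, hj]
      have hs1 : (pos ++ (b :: bt) ++ z :: rest').set ((pos ++ (b :: bt)).length) b
          = pos ++ (b :: bt) ++ b :: rest' := by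
        rw [set_len]; rfl
      rw [hs1]
      have hs2 : (pos ++ (b :: bt) ++ b :: rest').set pos.length z
          = pos ++ z :: (bt ++ b :: rest') := by
        rw [List.append_assoc, set_len]; rfl
      rw [hs2]
      simp [stepQ, if_pos hp]
  · rw [if_neg (by rw [hz]; exact hp)]
    simp [stepQ, if_neg hp, List.append_assoc]

theorem mainA : ∀ (m : Nat) (rest pos buf : List Int) (n : Nat), rest.length = m →
    n = pos.length + buf.length + rest.length →
    ((List.range' (pos.length + buf.length) rest.length).foldl (stepA n) (pos ++ buf ++ rest, pos.length)).1
    = ((dbl rest).foldl stepQ (pos, buf)).1 ++ ((dbl rest).foldl stepQ (pos, buf)).2 := by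
  intro m
  induction m with
  | zero =>
    intro rest pos buf n hlen hn
    rw [List.length_eq_zero_iff] at hlen
    subst hlen
    simp [dbl]
  | succ m ih =>
    intro rest pos buf n hlen hn
    cases rest with
    | nil => simp at hlen
    | cons x t =>
      have key : ∃ (z : Int) (rest' : List Int), dbl (x :: t) = z :: dbl rest' ∧
          rest'.length = t.length ∧
          stepA n (pos ++ buf ++ x :: t, pos.length) (pos.length + buf.length)
            = ((stepQ (pos, buf) z).1 ++ (stepQ (pos, buf) z).2 ++ rest',
               (stepQ (pos, buf) z).1.length) := by
        have hk : pos.length + buf.length = (pos ++ buf).length := by simp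
        have hx0 : (pos ++ buf ++ x :: t).getD ((pos ++ buf).length) 0 = x := by
          rw [getD_len]; rfl
        cases t with
        | nil =>
          refine ⟨x, [], by simp [dbl], rfl, ?_⟩
          have hguard : ¬((pos ++ buf).length + 1 < n ∧
              (pos ++ buf ++ [x]).getD ((pos ++ buf).length) 0
                = (pos ++ buf ++ [x]).getD ((pos ++ buf).length + 1) 0) := by
            intro ⟨h1, _⟩
            simp at hn
            omega
          simp only [stepA, hk, if_neg hguard]
          exact stepA_swap pos buf [] x
        | cons y t' =>
          have hx1 : (pos ++ buf ++ x :: y :: t').getD ((pos ++ buf).length + 1) 0 = y := by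
            have : pos ++ buf ++ x :: y :: t' = (pos ++ buf ++ [x]) ++ y :: t' := by simp
            rw [this]
            have : (pos ++ buf).length + 1 = (pos ++ buf ++ [x]).length := by simp; omega
            rw [this, getD_len]; rfl
          have hlt : (pos ++ buf).length + 1 < n := by simp at hn ⊢; omega
          by_cases hxy : x = y
          · refine ⟨x * 2, 0 :: t', by rw [dbl]; simp [hxy], by simp, ?_⟩
            have hguard : ((pos ++ buf).length + 1 < n ∧
                (pos ++ buf ++ x :: y :: t').getD ((pos ++ buf).length) 0
                  = (pos ++ buf ++ x :: y :: t').getD ((pos ++ buf).length + 1) 0) := by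
              exact ⟨hlt, by rw [hx0, hx1, hxy]⟩
            simp only [stepA, hk, if_pos hguard]
            have hs1 : (pos ++ buf ++ x :: y :: t').set ((pos ++ buf).length)
                ((pos ++ buf ++ x :: y :: t').getD ((pos ++ buf).length) 0 * 2)
                = pos ++ buf ++ (x * 2) :: y :: t' := by
              rw [hx0, set_len]; rfl
            rw [hs1]
            have hs2 : (pos ++ buf ++ (x * 2) :: y :: t').set ((pos ++ buf).length + 1) 0
                = pos ++ buf ++ (x * 2) :: 0 :: t' := by
              have e1 : pos ++ buf ++ (x * 2) :: y :: t' = (pos ++ buf ++ [x * 2]) ++ y :: t' := by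
                simp
              have e2 : (pos ++ buf).length + 1 = (pos ++ buf ++ [x * 2]).length := by
                simp; omega
              rw [e1, e2, set_len]; simp
            rw [hs2]
            exact stepA_swap pos buf (0 :: t') (x * 2)
          · refine ⟨x, y :: t', by rw [dbl]; simp [hxy], rfl, ?_⟩
            have hguard : ¬((pos ++ buf).length + 1 < n ∧
                (pos ++ buf ++ x :: y :: t').getD ((pos ++ buf).length) 0
                  = (pos ++ buf ++ x :: y :: t').getD ((pos ++ buf).length + 1) 0) := by
              intro ⟨_, h2⟩
              rw [hx0, hx1] at h2
              exact hxy h2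
            simp only [stepA, hk, if_neg hguard]
            exact stepA_swap pos buf (y :: t') x
      obtain ⟨z, rest', hd, hlen', hstep⟩ := key
      have hq : (stepQ (pos, buf) z).1.length + (stepQ (pos, buf) z).2.length
          = pos.length + buf.length + 1 := by
        unfold stepQ
        by_cases hp : z > 0
        · cases buf <;> simp [if_pos hp]; omega
        · simp [if_neg hp]; omega
      rw [List.length_cons, List.range'_succ, List.foldl_cons, hstep, hd, List.foldl_cons,
        ← hq, ← hlen']
      exact ih rest' (stepQ (pos, buf) z).1 (stepQ (pos, buf) z).2 n (by simp only [List.length_cons] at hlen; omega)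
        (by simp only [List.length_cons] at hn; omega)

-- B's swap pass realises the same queue fold stepQ
theorem mainB : ∀ (rest pos buf : List Int),
    ((List.range' (pos.length + buf.length) rest.length).foldl stepB (pos ++ buf ++ rest, pos.length)).1
    = (rest.foldl stepQ (pos, buf)).1 ++ (rest.foldl stepQ (pos, buf)).2 := by
  intro rest
  induction rest with
  | nil => intro pos buf; simp
  | cons z rest' ih =>
    intro pos buf
    have hk : pos.length + buf.length = (pos ++ buf).length := by simp
    have hstep : stepB (pos ++ buf ++ z :: rest', pos.length) ((pos ++ buf).length)
        = ((stepQ (pos, buf) z).1 ++ (stepQ (pos, buf) z).2 ++ rest',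
           (stepQ (pos, buf) z).1.length) := by
      simp only [stepB]
      exact stepA_swap pos buf rest' z
    have hq : (stepQ (pos, buf) z).1.length + (stepQ (pos, buf) z).2.length
        = pos.length + buf.length + 1 := by
      unfold stepQ
      by_cases hp : z > 0
      · cases buf <;> simp [if_pos hp]; omega
      · simp [if_neg hp]; omega
    rw [List.length_cons, List.range'_succ, List.foldl_cons, hk, hstep, List.foldl_cons, ← hk, ← hq]
    exact ih (stepQ (pos, buf) z).1 (stepQ (pos, buf) z).2

-- ===== VERDICT (by name: the statement is the Claim_ definition above) =====
theorem applyOperations2_spec : Claim_equal_applyOperations2 := by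
  intro nums _
  unfold Spec_applyOperations2
  have hd : (match (nums.foldl stepD ([], none)).2 with
      | none => (nums.foldl stepD ([], none)).1
      | some c => (nums.foldl stepD ([], none)).1 ++ [c]) = dbl nums := by
    cases nums with
    | nil => simp [dbl]
    | cons x t =>
      have := finD_foldl t [] x
      simpa [stepD] using this
  have hA := mainA nums.length nums [] [] nums.length rfl (by simp)
  simp only [List.length_nil, Nat.add_zero, List.nil_append, List.append_nil] at hA
  have hB := mainB (dbl nums) [] []
  simp only [List.length_nil, Nat.add_zero, List.nil_append] at hB
  simp only [applyOperations2, applyOperations2_alt]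
  rw [hd, List.range_eq_range', List.range_eq_range', hA, hB]
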